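-- pv_equiv track=rewrite | github.com/DiegoAudiffred/Napoli | custom_filters.py | numeros_a_letras
-- ===== SOURCE A (Python) =====
-- def numeros_a_letras(value):
--     numeros = {
--         '0': 'cero',
--         '1': 'uno',
--         '2': 'dos',
--         '3': 'tres',
--         '4': 'cuatro',
--         '5': 'cinco',
--         '6': 'seis',
--         '7': 'siete',
--         '8': 'ocho',
--         '9': 'nueve',
--     }
--     letras = ''.join([numeros[char] if char in numeros else char for char in str(value)])
--     return letras
-- ===== SOURCE B (Python) =====
-- def numeros_a_letras(value):
--     palabras = ('cero', 'uno', 'dos', 'tres', 'cuatro',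
--                 'cinco', 'seis', 'siete', 'ocho', 'nueve')
--
--     def conv(s):
--         if not s:
--             return ''
--         c = s[0]
--         cabeza = palabras[ord(c) - 48] if '0' <= c <= '9' else c
--         return cabeza + conv(s[1:])
--
--     return conv(str(value))
-- ===== Notes on version B (the rewrite author's own statement) =====
-- stated objective: alternative
-- what changed: Replaces the dict-lookup-per-char join comprehension with a recursive head/tail decomposition that indexes a tuple of words by character code (ord(c)-48) behind a range test instead of a dict membership test.
import Mathlib
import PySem

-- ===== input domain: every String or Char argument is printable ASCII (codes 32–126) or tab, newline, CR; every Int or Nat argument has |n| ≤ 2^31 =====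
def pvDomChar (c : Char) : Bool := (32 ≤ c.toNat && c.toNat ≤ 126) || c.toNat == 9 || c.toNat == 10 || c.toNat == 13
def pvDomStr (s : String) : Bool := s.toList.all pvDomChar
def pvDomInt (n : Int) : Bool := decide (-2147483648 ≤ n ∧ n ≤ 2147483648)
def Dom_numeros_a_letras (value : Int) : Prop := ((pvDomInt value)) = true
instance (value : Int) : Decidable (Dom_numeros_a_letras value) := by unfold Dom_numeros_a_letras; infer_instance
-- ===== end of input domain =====

-- B walks the digits of str(value) by recursive head/tail decomposition, indexing a word
-- table by character code behind a range test, instead of A's dict lookup + join (alternative).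

-- ===== PORT A =====
def pvNumerosA : PySem.Dict String String :=
  ⟨[("0", "cero"), ("1", "uno"), ("2", "dos"), ("3", "tres"), ("4", "cuatro"),
    ("5", "cinco"), ("6", "seis"), ("7", "siete"), ("8", "ocho"), ("9", "nueve")]⟩

def numeros_a_letras (value : Int) : String :=
  PySem.Str.join "" ((PySem.Int.toStr value).toList.map (fun ch =>
    if pvNumerosA.contains (String.ofList [ch]) then
      (pvNumerosA.get? (String.ofList [ch])).getD (String.ofList [ch])
    else String.ofList [ch]))

-- ===== PORT B =====
-- the tuple 'palabras', as the ten words' character lists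
def pvPalabras : List (List Char) :=
  [['c','e','r','o'], ['u','n','o'], ['d','o','s'], ['t','r','e','s'],
   ['c','u','a','t','r','o'], ['c','i','n','c','o'], ['s','e','i','s'],
   ['s','i','e','t','e'], ['o','c','h','o'], ['n','u','e','v','e']]

-- conv(s): head word-or-char prepended to the recursive tail conversion
-- (the guard '0' <= c <= '9' makes the index ord(c)-48 in range, so pyGetD is exact here)
def pvConv : List Char → List Char
  | [] => []
  | c :: resto =>
    (if '0' ≤ c ∧ c ≤ '9' then
        PySem.List.pyGetD pvPalabras ((c.toNat : Int) - 48) []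
      else [c]) ++ pvConv resto

def numeros_a_letras_alt (value : Int) : String :=
  String.ofList (pvConv (PySem.Int.toStr value).toList)

-- ===== PRECONDITION & SPEC =====
def Spec_numeros_a_letras (value : Int) (out : String) : Prop := out = numeros_a_letras_alt value
instance (value : Int) (out : String) : Decidable (Spec_numeros_a_letras value out) := by unfold Spec_numeros_a_letras; infer_instance

-- ===== CLAIM (what is proved, stated in full; the proofs are below) =====
def Claim_equal_numeros_a_letras : Prop := ∀ (value : Int), Dom_numeros_a_letras value → Spec_numeros_a_letras value (numeros_a_letras value)

-- ===== LEMMAS AND PROOFS =====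

-- the common per-character mapping both programs implement
def pvG (c : Char) : List Char :=
  if c = '0' then ['c','e','r','o'] else if c = '1' then ['u','n','o'] else
  if c = '2' then ['d','o','s'] else if c = '3' then ['t','r','e','s'] else
  if c = '4' then ['c','u','a','t','r','o'] else if c = '5' then ['c','i','n','c','o'] else
  if c = '6' then ['s','e','i','s'] else if c = '7' then ['s','i','e','t','e'] else
  if c = '8' then ['o','c','h','o'] else if c = '9' then ['n','u','e','v','e'] else [c]

theorem pvChar_eq_of_toNat (c d : Char) (h : c.toNat = d.toNat) : c = d := by
  apply Char.ext
  exact UInt32.toNat_inj.mp h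

theorem pvB_char (c : Char) :
    (if '0' ≤ c ∧ c ≤ '9' then
        PySem.List.pyGetD pvPalabras ((c.toNat : Int) - 48) []
      else [c]) = pvG c := by
  by_cases h0 : c = '0'; · subst h0; decide
  by_cases h1 : c = '1'; · subst h1; decide
  by_cases h2 : c = '2'; · subst h2; decide
  by_cases h3 : c = '3'; · subst h3; decide
  by_cases h4 : c = '4'; · subst h4; decide
  by_cases h5 : c = '5'; · subst h5; decide
  by_cases h6 : c = '6'; · subst h6; decide
  by_cases h7 : c = '7'; · subst h7; decide
  by_cases h8 : c = '8'; · subst h8; decide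
  by_cases h9 : c = '9'; · subst h9; decide
  have hnd : ¬ ('0' ≤ c ∧ c ≤ '9') := by
    rintro ⟨hl, hr⟩
    have hl' : (48 : Nat) ≤ c.toNat := hl
    have hr' : c.toNat ≤ 57 := hr
    interval_cases h : c.toNat
    · exact h0 (pvChar_eq_of_toNat c '0' h)
    · exact h1 (pvChar_eq_of_toNat c '1' h)
    · exact h2 (pvChar_eq_of_toNat c '2' h)
    · exact h3 (pvChar_eq_of_toNat c '3' h)
    · exact h4 (pvChar_eq_of_toNat c '4' h)
    · exact h5 (pvChar_eq_of_toNat c '5' h)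
    · exact h6 (pvChar_eq_of_toNat c '6' h)
    · exact h7 (pvChar_eq_of_toNat c '7' h)
    · exact h8 (pvChar_eq_of_toNat c '8' h)
    · exact h9 (pvChar_eq_of_toNat c '9' h)
  simp [hnd, pvG, h0, h1, h2, h3, h4, h5, h6, h7, h8, h9]

theorem pvConv_eq_flatMap (cs : List Char) : pvConv cs = cs.flatMap pvG := by
  induction cs with
  | nil => rfl
  | cons c t ih => rw [pvConv, pvB_char, ih, List.flatMap_cons]

theorem pvBeq_lit_false {c d : Char} (s : String) (hs : s.toList = [d]) (h : c ≠ d) :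
    (s == String.ofList [c]) = false := by
  apply beq_eq_false_iff_ne.mpr
  intro he
  apply h
  have := congrArg String.toList he
  rw [hs, String.toList_ofList] at this
  exact (List.cons.inj this).1.symm

theorem pvFlatten_intersperse_nil (l : List (List Char)) :
    (List.intersperse ([] : List Char) l).flatten = l.flatten := by
  induction l with
  | nil => rfl
  | cons x t ih =>
    cases t with
    | nil => rfl
    | cons y u =>
      rw [show List.intersperse ([] : List Char) (x :: y :: u)
            = x :: [] :: List.intersperse [] (y :: u) from by simp [List.intersperse]]
      simp only [List.flatten_cons] at ih ⊢
      rw [List.nil_append, ih]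

theorem pvA_char (c : Char) :
    (if pvNumerosA.contains (String.ofList [c]) then
        (pvNumerosA.get? (String.ofList [c])).getD (String.ofList [c])
      else String.ofList [c]).toList = pvG c := by
  by_cases h0 : c = '0'; · subst h0; decide
  by_cases h1 : c = '1'; · subst h1; decide
  by_cases h2 : c = '2'; · subst h2; decide
  by_cases h3 : c = '3'; · subst h3; decide
  by_cases h4 : c = '4'; · subst h4; decide
  by_cases h5 : c = '5'; · subst h5; decide
  by_cases h6 : c = '6'; · subst h6; decide
  by_cases h7 : c = '7'; · subst h7; decide
  by_cases h8 : c = '8'; · subst h8; decide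
  by_cases h9 : c = '9'; · subst h9; decide
  have hcont : pvNumerosA.contains (String.ofList [c]) = false := by
    simp only [pvNumerosA, PySem.Dict.contains, List.any_cons, List.any_nil,
      pvBeq_lit_false (c := c) "0" rfl h0, pvBeq_lit_false (c := c) "1" rfl h1,
      pvBeq_lit_false (c := c) "2" rfl h2, pvBeq_lit_false (c := c) "3" rfl h3,
      pvBeq_lit_false (c := c) "4" rfl h4, pvBeq_lit_false (c := c) "5" rfl h5,
      pvBeq_lit_false (c := c) "6" rfl h6, pvBeq_lit_false (c := c) "7" rfl h7,
      pvBeq_lit_false (c := c) "8" rfl h8, pvBeq_lit_false (c := c) "9" rfl h9,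
      Bool.or_self]
  rw [hcont]
  simp [String.toList_ofList, pvG, h0, h1, h2, h3, h4, h5, h6, h7, h8, h9]

theorem pvA_toList (value : Int) :
    (numeros_a_letras value).toList = (PySem.Int.toChars value).flatMap pvG := by
  unfold numeros_a_letras
  rw [PySem.Str.toList_join]
  have h : (PySem.Int.toStr value).toList = PySem.Int.toChars value := String.toList_ofList
  rw [h, List.map_map]
  have hj : ∀ parts : List (List Char), PySem.Chars.join ("".toList) parts = parts.flatten := by
    intro parts
    show List.intercalate [] parts = parts.flatten
    unfold List.intercalate
    exact pvFlatten_intersperse_nil parts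
  rw [hj, ← List.flatMap_def]
  exact List.flatMap_congr (fun c _ => pvA_char c)

-- ===== VERDICT (by name: the statement is the Claim_ definition above) =====
theorem numeros_a_letras_spec : Claim_equal_numeros_a_letras := by
  intro value _
  unfold Spec_numeros_a_letras
  have hB : (numeros_a_letras_alt value).toList = (PySem.Int.toChars value).flatMap pvG := by
    unfold numeros_a_letras_alt
    rw [String.toList_ofList, pvConv_eq_flatMap]
    congr 1
    exact String.toList_ofList
  have : (numeros_a_letras value).toList = (numeros_a_letras_alt value).toList := by
    rw [pvA_toList, hB]
  calc numeros_a_letras value = String.ofList (numeros_a_letras value).toList := (String.ofList_toList).symm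
    _ = String.ofList (numeros_a_letras_alt value).toList := by rw [this]
    _ = numeros_a_letras_alt value := String.ofList_toList
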